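-- pv_equiv track=rewrite | github.com/arterial-io/mesh | mesh/doc/generator.py | _collate_schema_fields
-- ===== SOURCE A (Python) =====
-- def _collate_schema_fields(fields):
--     if 'id' in fields:
--         yield 'id', fields['id']
--
--     buckets = [], [], [], []
--     for name, field in sorted(fields.items()):
--         if name != 'id':
--             structural = field.get('structural', False)
--             if field.get('readonly'):
--                 if structural:
--                     buckets[3].append((name, field))
--                 else:
--                     buckets[2].append((name, field))
--             else:
--                 if structural:
--                     buckets[1].append((name, field))
--                 else:
--                     buckets[0].append((name, field))
--
--     for bucket in buckets:
--         for name, field in bucket: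
--             yield name, field
-- ===== SOURCE B (Python) =====
-- def _collate_schema_fields(fields):
--     def _key(item):
--         name, field = item
--         if name == 'id':
--             return (-1, name)
--         return (2 * bool(field.get('readonly')) + bool(field.get('structural', False)), name)
--     for name, field in sorted(fields.items(), key=_key):
--         yield name, field
-- ===== Notes on version B (the rewrite author's own statement) =====
-- stated objective: idiomatic
-- what changed: Replaces the sort-then-four-bucket partition (sort by name, distribute into four lists by readonly/structural flags, concatenate) with a single key-based sort: one sorted() call whose key returns (-1, name) for 'id' and (2*readonly+structural, name) otherwise; Pre_ excludes association lists with duplicate keys, which represent no Python dict.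
import Mathlib
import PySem

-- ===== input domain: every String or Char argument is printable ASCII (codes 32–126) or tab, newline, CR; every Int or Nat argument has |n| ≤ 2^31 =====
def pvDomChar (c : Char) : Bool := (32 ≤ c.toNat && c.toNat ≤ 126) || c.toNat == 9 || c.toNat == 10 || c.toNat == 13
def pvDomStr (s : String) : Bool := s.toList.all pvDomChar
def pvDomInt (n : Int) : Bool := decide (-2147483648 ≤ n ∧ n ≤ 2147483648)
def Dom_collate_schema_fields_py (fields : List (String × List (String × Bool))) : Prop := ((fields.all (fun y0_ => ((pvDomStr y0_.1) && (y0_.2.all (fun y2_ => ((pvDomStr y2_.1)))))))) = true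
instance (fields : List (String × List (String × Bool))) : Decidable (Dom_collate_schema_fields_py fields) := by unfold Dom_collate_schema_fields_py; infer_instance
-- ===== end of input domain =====

-- B replaces A's sort-then-four-bucket partition by a single key-based sort (idiomatic; same cost).

-- ===== PORT A =====
-- field.get('structural', False) / truthiness of field.get('readonly') (None is falsy)
def csfRo (f : List (String × Bool)) : Bool := (PySem.Dict.mk f).getD "readonly" false
def csfSt (f : List (String × Bool)) : Bool := (PySem.Dict.mk f).getD "structural" false

-- "if 'id' in fields: yield 'id', fields['id']"  (dict lookup)
def csfHead (fields : List (String × List (String × Bool))) : List (String × List (String × Bool)) :=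
  match (PySem.Dict.mk fields).get? "id" with
  | some v => [("id", v)]
  | none => []

-- the loop body: append (name, field) to the bucket chosen by the readonly/structural flags
def csfStep
    (b : List (String × List (String × Bool)) × List (String × List (String × Bool)) ×
         List (String × List (String × Bool)) × List (String × List (String × Bool)))
    (nf : String × List (String × Bool)) :
    List (String × List (String × Bool)) × List (String × List (String × Bool)) ×
    List (String × List (String × Bool)) × List (String × List (String × Bool)) :=
  if nf.1 != "id" then
    let structural := csfSt nf.2
    if csfRo nf.2 then
      if structural then (b.1, b.2.1, b.2.2.1, b.2.2.2 ++ [nf])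
      else (b.1, b.2.1, b.2.2.1 ++ [nf], b.2.2.2)
    else
      if structural then (b.1, b.2.1 ++ [nf], b.2.2.1, b.2.2.2)
      else (b.1 ++ [nf], b.2.1, b.2.2.1, b.2.2.2)
  else b

def collate_schema_fields_py (fields : List (String × List (String × Bool))) : List (String × (List (String × Bool))) :=
  -- sorted(fields.items()): a dict's keys are distinct, so tuple comparison is comparison by name
  let buckets := (PySem.List.sorted fields (fun nf => nf.1)).foldl csfStep ([], [], [], [])
  csfHead fields ++ buckets.1 ++ buckets.2.1 ++ buckets.2.2.1 ++ buckets.2.2.2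

-- ===== PORT B =====
-- first component of B's sort key: -1 for 'id', else 2*bool(readonly) + bool(structural)
def csfKey1 (nf : String × List (String × Bool)) : Int :=
  if nf.1 == "id" then -1
  else 2 * (if csfRo nf.2 then 1 else 0) + (if csfSt nf.2 then 1 else 0)

def collate_schema_fields_py_alt (fields : List (String × List (String × Bool))) : List (String × (List (String × Bool))) :=
  -- sorted(fields.items(), key=_key) with the tuple key (_rank, name)
  PySem.List.sorted2 fields csfKey1 (fun nf => nf.1)

-- ===== PRECONDITION & SPEC =====
-- Pre_ excludes association lists with duplicate keys: they represent no Python dict (a dict's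
-- keys are unique), and on them the ports' first-match / keep-all readings are both accidental.
def Pre_collate_schema_fields_py (fields : List (String × List (String × Bool))) : Prop :=
  (fields.map Prod.fst).Nodup
instance (fields : List (String × List (String × Bool))) : Decidable (Pre_collate_schema_fields_py fields) := by unfold Pre_collate_schema_fields_py; infer_instance

def pvWitness_collate_schema_fields_py : (List (String × List (String × Bool))) :=
  [("name", [("readonly", true)]), ("id", []), ("kind", [("structural", true)])]

def Spec_collate_schema_fields_py (fields : List (String × List (String × Bool))) (out : List (String × (List (String × Bool)))) : Prop := out = collate_schema_fields_py_alt fields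
instance (fields : List (String × List (String × Bool))) (out : List (String × (List (String × Bool)))) : Decidable (Spec_collate_schema_fields_py fields out) := by unfold Spec_collate_schema_fields_py; infer_instance

-- ===== CLAIM (what is proved, stated in full; the proofs are below) =====
def Claim_equal_collate_schema_fields_py : Prop := ∀ (fields : List (String × List (String × Bool))), Dom_collate_schema_fields_py fields → Pre_collate_schema_fields_py fields → Spec_collate_schema_fields_py fields (collate_schema_fields_py fields)

-- ===== LEMMAS AND PROOFS =====

-- B's whole tuple key, as a single linearly ordered key
def csfKeyL (nf : String × List (String × Bool)) : Lex (Int × String) := toLex (csfKey1 nf, nf.1)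

-- the four bucket predicates of A's loop
def csfQ0 (nf : String × List (String × Bool)) : Bool := (nf.1 != "id") && !csfRo nf.2 && !csfSt nf.2
def csfQ1 (nf : String × List (String × Bool)) : Bool := (nf.1 != "id") && !csfRo nf.2 && csfSt nf.2
def csfQ2 (nf : String × List (String × Bool)) : Bool := (nf.1 != "id") && csfRo nf.2 && !csfSt nf.2
def csfQ3 (nf : String × List (String × Bool)) : Bool := (nf.1 != "id") && csfRo nf.2 && csfSt nf.2

lemma csf_before_eq :
    (fun (a b : String × List (String × Bool)) =>
        decide (csfKey1 a < csfKey1 b) || (!decide (csfKey1 b < csfKey1 a) && decide (a.1 < b.1)))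
      = fun a b => decide (csfKeyL a < csfKeyL b) := by
  funext a b
  simp only [csfKeyL, Prod.Lex.toLex_lt_toLex]
  rcases lt_trichotomy (csfKey1 a) (csfKey1 b) with h | h | h <;>
    simp [h, not_lt.mpr, le_of_lt] <;> omega

lemma csf_alt_eq_sorted (fields : List (String × List (String × Bool))) :
    collate_schema_fields_py_alt fields = PySem.List.sorted fields csfKeyL := by
  unfold collate_schema_fields_py_alt PySem.List.sorted2 PySem.List.sorted
  rw [csf_before_eq]

lemma csf_fold (l : List (String × List (String × Bool)))
    (a b c d : List (String × List (String × Bool))) :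
    l.foldl csfStep (a, b, c, d) =
      (a ++ l.filter csfQ0, b ++ l.filter csfQ1, c ++ l.filter csfQ2, d ++ l.filter csfQ3) := by
  induction l generalizing a b c d with
  | nil => simp
  | cons x t ih =>
    cases hid : x.1 != "id" <;> cases hro : csfRo x.2 <;> cases hst : csfSt x.2 <;>
      simp [csfStep, csfQ0, csfQ1, csfQ2, csfQ3, hid, hro, hst, ih]

lemma csf_head_eq (fields : List (String × List (String × Bool)))
    (h : (fields.map Prod.fst).Nodup) :
    csfHead fields = fields.filter (fun nf => nf.1 == "id") := by
  induction fields with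
  | nil => rfl
  | cons x t ih =>
    simp only [List.map_cons, List.nodup_cons] at h
    by_cases hx : x.1 = "id"
    · have hfil : t.filter (fun nf => nf.1 == "id") = [] := by
        apply List.filter_eq_nil_iff.mpr
        intro nf hnf
        simp only [beq_iff_eq]
        intro hne
        exact h.1 (by rw [hx, ← hne]; exact List.mem_map_of_mem hnf)
      have hbeq : (x.1 == "id") = true := by simp [hx]
      unfold csfHead
      rw [PySem.Dict.get?_mk_cons, hbeq]
      simp only [if_true, List.filter_cons, hbeq, hfil]
      rw [← hx]
    · have hbeq : (x.1 == "id") = false := by simp [hx]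
      unfold csfHead
      rw [PySem.Dict.get?_mk_cons, hbeq]
      simp only [Bool.false_eq_true, if_false, List.filter_cons, hbeq]
      exact ih h.2

lemma csf_key1_head {fields : List (String × List (String × Bool))}
    {x : String × List (String × Bool)} (hx : x ∈ csfHead fields) :
    csfKey1 x = -1 := by
  unfold csfHead at hx
  rcases hmatch : (PySem.Dict.mk fields).get? "id" with _ | v <;> rw [hmatch] at hx <;>
    simp at hx
  subst hx; simp [csfKey1]

lemma csf_head_pairwise (fields : List (String × List (String × Bool)))
    (R : (String × List (String × Bool)) → (String × List (String × Bool)) → Prop) :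
    (csfHead fields).Pairwise R := by
  unfold csfHead
  rcases (PySem.Dict.mk fields).get? "id" with _ | v <;> simp

lemma csf_key1_q0 {x : String × List (String × Bool)} (h : csfQ0 x = true) : csfKey1 x = 0 := by
  simp only [csfQ0, Bool.and_eq_true, Bool.not_eq_true', bne_iff_ne] at h
  simp [csfKey1, h.1.1, h.1.2, h.2]
lemma csf_key1_q1 {x : String × List (String × Bool)} (h : csfQ1 x = true) : csfKey1 x = 1 := by
  simp only [csfQ1, Bool.and_eq_true, Bool.not_eq_true', bne_iff_ne] at h
  simp [csfKey1, h.1.1, h.1.2, h.2]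
lemma csf_key1_q2 {x : String × List (String × Bool)} (h : csfQ2 x = true) : csfKey1 x = 2 := by
  simp only [csfQ2, Bool.and_eq_true, Bool.not_eq_true', bne_iff_ne] at h
  simp [csfKey1, h.1.1, h.1.2, h.2]
lemma csf_key1_q3 {x : String × List (String × Bool)} (h : csfQ3 x = true) : csfKey1 x = 3 := by
  simp only [csfQ3, Bool.and_eq_true, bne_iff_ne] at h
  simp [csfKey1, h.1.1, h.1.2, h.2]

-- strict lexicographic order from a strictly smaller first key
lemma csf_lt_of_key1_lt {a b : String × List (String × Bool)}
    (h : csfKey1 a < csfKey1 b) : csfKeyL a < csfKeyL b := by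
  simp only [csfKeyL, Prod.Lex.toLex_lt_toLex]
  exact Or.inl h

lemma csf_lt_of_key1_eq {a b : String × List (String × Bool)}
    (h : csfKey1 a = csfKey1 b) (h2 : a.1 < b.1) : csfKeyL a < csfKeyL b := by
  simp only [csfKeyL, Prod.Lex.toLex_lt_toLex]
  exact Or.inr ⟨h, h2⟩

-- pointwise strict order within one bucket (equal first key component, strictly increasing names)
lemma csf_filter_pairwise (s1 : List (String × List (String × Bool)))
    (hlt : s1.Pairwise (fun a b => a.1 < b.1))
    (q : (String × List (String × Bool)) → Bool) (k : Int)
    (hk : ∀ x, q x = true → csfKey1 x = k) :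
    (s1.filter q).Pairwise (fun a b => csfKeyL a < csfKeyL b) := by
  have h := hlt.filter q
  refine h.imp_of_mem (fun {a b} ha hb hab => ?_)
  exact csf_lt_of_key1_eq (by rw [hk a (List.of_mem_filter ha), hk b (List.of_mem_filter hb)]) hab

-- ===== VERDICT (by name: the statement is the Claim_ definition above) =====
theorem collate_schema_fields_py_spec : Claim_equal_collate_schema_fields_py := by
  intro fields _hdom hpre
  unfold Spec_collate_schema_fields_py
  rw [csf_alt_eq_sorted]
  have hA : collate_schema_fields_py fields =
      csfHead fields ++ (PySem.List.sorted fields (fun nf => nf.1)).filter csfQ0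
        ++ (PySem.List.sorted fields (fun nf => nf.1)).filter csfQ1
        ++ (PySem.List.sorted fields (fun nf => nf.1)).filter csfQ2
        ++ (PySem.List.sorted fields (fun nf => nf.1)).filter csfQ3 := by
    unfold collate_schema_fields_py
    rw [csf_fold]
    simp [List.append_assoc]
  rw [hA]
  set s1 := PySem.List.sorted fields (fun nf => nf.1) with hs1
  have hps : s1.Perm fields := PySem.List.sorted_perm fields _ _
  symm
  apply PySem.List.sorted_eq_of_perm_of_pairwise_lt fields _ csfKeyL
  · -- permutation with the input
    have e0 : s1.filter csfQ0 =
        (s1.filter (fun nf => (nf.1 != "id") && !csfRo nf.2)).filter (fun nf => !csfSt nf.2) := by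
      rw [List.filter_filter]
      apply List.filter_congr
      intro x _
      simp only [csfQ0]
      cases (x.1 != "id") <;> cases csfRo x.2 <;> cases csfSt x.2 <;> rfl
    have e1 : s1.filter csfQ1 =
        (s1.filter (fun nf => (nf.1 != "id") && !csfRo nf.2)).filter (fun nf => !(!csfSt nf.2)) := by
      rw [List.filter_filter]
      apply List.filter_congr
      intro x _
      simp only [csfQ1]
      cases (x.1 != "id") <;> cases csfRo x.2 <;> cases csfSt x.2 <;> rfl
    have e2 : s1.filter csfQ2 =
        (s1.filter (fun nf => (nf.1 != "id") && csfRo nf.2)).filter (fun nf => !csfSt nf.2) := by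
      rw [List.filter_filter]
      apply List.filter_congr
      intro x _
      simp only [csfQ2]
      cases (x.1 != "id") <;> cases csfRo x.2 <;> cases csfSt x.2 <;> rfl
    have e3 : s1.filter csfQ3 =
        (s1.filter (fun nf => (nf.1 != "id") && csfRo nf.2)).filter (fun nf => !(!csfSt nf.2)) := by
      rw [List.filter_filter]
      apply List.filter_congr
      intro x _
      simp only [csfQ3]
      cases (x.1 != "id") <;> cases csfRo x.2 <;> cases csfSt x.2 <;> rfl
    have enro : s1.filter (fun nf => (nf.1 != "id") && !csfRo nf.2) =
        (s1.filter (fun nf => nf.1 != "id")).filter (fun nf => !csfRo nf.2) := by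
      rw [List.filter_filter]
      apply List.filter_congr
      intro x _
      cases (x.1 != "id") <;> cases csfRo x.2 <;> rfl
    have ero : s1.filter (fun nf => (nf.1 != "id") && csfRo nf.2) =
        (s1.filter (fun nf => nf.1 != "id")).filter (fun nf => !(!csfRo nf.2)) := by
      rw [List.filter_filter]
      apply List.filter_congr
      intro x _
      cases (x.1 != "id") <;> cases csfRo x.2 <;> rfl
    have h01 : (s1.filter csfQ0 ++ s1.filter csfQ1).Perm
        (s1.filter (fun nf => (nf.1 != "id") && !csfRo nf.2)) := by
      rw [e0, e1]; exact List.filter_append_perm _ _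
    have h23 : (s1.filter csfQ2 ++ s1.filter csfQ3).Perm
        (s1.filter (fun nf => (nf.1 != "id") && csfRo nf.2)) := by
      rw [e2, e3]; exact List.filter_append_perm _ _
    have hnid : ((s1.filter (fun nf => (nf.1 != "id") && !csfRo nf.2)) ++
        (s1.filter (fun nf => (nf.1 != "id") && csfRo nf.2))).Perm
        (s1.filter (fun nf => nf.1 != "id")) := by
      rw [enro, ero]; exact List.filter_append_perm _ _
    have hidperm : (csfHead fields).Perm (s1.filter (fun nf => nf.1 == "id")) := by
      rw [csf_head_eq fields hpre]; exact (hps.filter _).symm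
    have hfull : ((s1.filter (fun nf => nf.1 == "id")) ++
        (s1.filter (fun nf => nf.1 != "id"))).Perm s1 :=
      List.filter_append_perm (fun nf => nf.1 == "id") s1
    have big : (csfHead fields ++ ((s1.filter csfQ0 ++ s1.filter csfQ1) ++ (s1.filter csfQ2 ++ s1.filter csfQ3))).Perm fields :=
      (List.Perm.append hidperm (List.Perm.append h01 h23)).trans
        ((List.Perm.append_left _ hnid).trans (hfull.trans hps))
    have assoc : csfHead fields ++ s1.filter csfQ0 ++ s1.filter csfQ1 ++ s1.filter csfQ2 ++ s1.filter csfQ3 =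
        csfHead fields ++ ((s1.filter csfQ0 ++ s1.filter csfQ1) ++ (s1.filter csfQ2 ++ s1.filter csfQ3)) := by
      simp [List.append_assoc]
    rw [assoc]
    exact big
  · -- strict pairwise order of B's key along A's output
    have hnodup : (s1.map Prod.fst).Nodup := ((hps.map Prod.fst).nodup_iff).mpr hpre
    have hne : s1.Pairwise (fun a b => a.1 ≠ b.1) := List.pairwise_map.mp hnodup
    have hle : s1.Pairwise (fun a b => a.1 ≤ b.1) := PySem.List.sorted_pairwise fields _
    have hlt : s1.Pairwise (fun a b => a.1 < b.1) :=
      (hle.and hne).imp (fun h => lt_of_le_of_ne h.1 h.2)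
    have hH : (csfHead fields).Pairwise (fun a b => csfKeyL a < csfKeyL b) :=
      csf_head_pairwise fields _
    have h0 := csf_filter_pairwise s1 hlt csfQ0 0 (fun x => csf_key1_q0)
    have h1 := csf_filter_pairwise s1 hlt csfQ1 1 (fun x => csf_key1_q1)
    have h2 := csf_filter_pairwise s1 hlt csfQ2 2 (fun x => csf_key1_q2)
    have h3 := csf_filter_pairwise s1 hlt csfQ3 3 (fun x => csf_key1_q3)
    have kH : ∀ x ∈ csfHead fields, csfKey1 x = -1 := fun x hx => csf_key1_head hx
    have k0 : ∀ x ∈ s1.filter csfQ0, csfKey1 x = 0 := fun x hx => csf_key1_q0 (List.of_mem_filter hx)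
    have k1 : ∀ x ∈ s1.filter csfQ1, csfKey1 x = 1 := fun x hx => csf_key1_q1 (List.of_mem_filter hx)
    have k2 : ∀ x ∈ s1.filter csfQ2, csfKey1 x = 2 := fun x hx => csf_key1_q2 (List.of_mem_filter hx)
    have k3 : ∀ x ∈ s1.filter csfQ3, csfKey1 x = 3 := fun x hx => csf_key1_q3 (List.of_mem_filter hx)
    have cross : ∀ {a b : String × List (String × Bool)} {i j : Int},
        csfKey1 a = i → csfKey1 b = j → i < j → csfKeyL a < csfKeyL b := by
      intro a b i j ha hb hij
      exact csf_lt_of_key1_lt (by rw [ha, hb]; exact hij)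
    simp only [List.pairwise_append, List.mem_append]
    refine ⟨⟨⟨⟨hH, h0, ?_⟩, h1, ?_⟩, h2, ?_⟩, h3, ?_⟩
    · intro a ha b hb
      exact cross (kH a ha) (k0 b hb) (by norm_num)
    · intro a ha b hb
      rcases ha with ha | ha
      · exact cross (kH a ha) (k1 b hb) (by norm_num)
      · exact cross (k0 a ha) (k1 b hb) (by norm_num)
    · intro a ha b hb
      rcases ha with (ha | ha) | ha
      · exact cross (kH a ha) (k2 b hb) (by norm_num)
      · exact cross (k0 a ha) (k2 b hb) (by norm_num)
      · exact cross (k1 a ha) (k2 b hb) (by norm_num)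
    · intro a ha b hb
      rcases ha with ((ha | ha) | ha) | ha
      · exact cross (kH a ha) (k3 b hb) (by norm_num)
      · exact cross (k0 a ha) (k3 b hb) (by norm_num)
      · exact cross (k1 a ha) (k3 b hb) (by norm_num)
      · exact cross (k2 a ha) (k3 b hb) (by norm_num)
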